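-- pv_equiv track=rewrite | github.com/benggi06/PythonProject | 포커게임/Ranking.py | is1Pair
-- ===== SOURCE A (Python) =====
-- def is1Pair(cardList):
--     numList=[]
--     countList=[]
--     for i,card in enumerate(cardList):
--         numList.append(card['value'])
--
--     for i in numList:
--         countList.append(numList.count(i))
--
--     if countList.count(2) == 2:
--         return True
--
--     else:
--         return
-- ===== SOURCE B (Python) =====
-- def is1Pair(cardList):
--     counts = {}
--     for card in cardList:
--         v = card['value']
--         counts[v] = counts.get(v, 0) + 1
--     pairs = 0
--     for c in counts.values():
--         if c == 2:
--             pairs += 1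
--     if pairs == 1:
--         return True
-- ===== Notes on version B (the rewrite author's own statement) =====
-- stated objective: faster
-- what changed: A maps every card's value through a nested numList.count scan and tests whether the list of per-position frequencies contains the entry 2 exactly twice; B builds a frequency dict in one pass and tests whether exactly one DISTINCT value has frequency 2, preserving the True/None (never False) return.
import Mathlib
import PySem

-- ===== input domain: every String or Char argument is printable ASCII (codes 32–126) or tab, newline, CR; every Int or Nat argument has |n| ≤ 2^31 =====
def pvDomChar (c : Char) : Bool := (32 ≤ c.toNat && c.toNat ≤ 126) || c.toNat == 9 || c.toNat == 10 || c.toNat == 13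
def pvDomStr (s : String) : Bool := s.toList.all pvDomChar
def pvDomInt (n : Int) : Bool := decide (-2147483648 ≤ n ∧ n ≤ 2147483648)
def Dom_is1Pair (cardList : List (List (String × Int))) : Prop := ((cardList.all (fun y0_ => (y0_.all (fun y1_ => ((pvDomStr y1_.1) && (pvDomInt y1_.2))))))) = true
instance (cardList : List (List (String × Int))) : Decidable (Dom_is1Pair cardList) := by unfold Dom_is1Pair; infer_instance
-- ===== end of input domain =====

-- B replaces A's quadratic nested `.count` scan by one dict-building pass plus a scan over the
-- DISTINCT values' counts (exactly one distinct value with frequency 2); return value only,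
-- A's `None` (not False) fall-through is `none`.

-- ===== PORT A =====
-- first loop of A: numList.append(card['value']); `none` = KeyError on a missing 'value' key
def pvNumList : List (List (String × Int)) → Option (List Int)
  | [] => some []
  | card :: rest =>
    match (PySem.Dict.mk card).get? "value" with
    | none => none
    | some v => (pvNumList rest).map (fun l => v :: l)

def is1Pair (cardList : List (List (String × Int))) : Option Bool :=
  match pvNumList cardList with
  | none => none
  | some numList =>
    -- second loop: countList.append(numList.count(i))
    let countList : List Int :=
      numList.foldl (fun acc i => acc ++ [((PySem.List.count numList i : Nat) : Int)]) []
    if PySem.List.count countList 2 = 2 then some true else none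

-- ===== PORT B =====
-- B's single pass: counts[v] = counts.get(v, 0) + 1; `none` = KeyError on a missing 'value' key
def pvBuildCounts : List (List (String × Int)) → PySem.Dict Int Int → Option (PySem.Dict Int Int)
  | [], d => some d
  | card :: rest, d =>
    match (PySem.Dict.mk card).get? "value" with
    | none => none
    | some v => pvBuildCounts rest (d.insert v (d.getD v 0 + 1))

def is1Pair_alt (cardList : List (List (String × Int))) : Option Bool :=
  match pvBuildCounts cardList PySem.Dict.empty with
  | none => none
  | some counts =>
    let pairs : Int := counts.values.foldl (fun p c => if c = 2 then p + 1 else p) 0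
    if pairs = 1 then some true else none

-- ===== PRECONDITION & SPEC =====
-- Pre_ excludes exactly the inputs where some card lacks the key "value": there A (and B) raise KeyError.
def Pre_is1Pair (cardList : List (List (String × Int))) : Prop :=
  ∀ card ∈ cardList, ((PySem.Dict.mk card).get? "value").isSome = true
instance (cardList : List (List (String × Int))) : Decidable (Pre_is1Pair cardList) := by unfold Pre_is1Pair; infer_instance

def pvWitness_is1Pair : (List (List (String × Int))) := [[("value", 3)], [("value", 3)], [("value", 7)]]

def Spec_is1Pair (cardList : List (List (String × Int))) (out : Option Bool) : Prop := out = is1Pair_alt cardList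
instance (cardList : List (List (String × Int))) (out : Option Bool) : Decidable (Spec_is1Pair cardList out) := by unfold Spec_is1Pair; infer_instance

-- ===== CLAIM (what is proved, stated in full; the proofs are below) =====
def Claim_equal_is1Pair : Prop := ∀ (cardList : List (List (String × Int))), Dom_is1Pair cardList → Pre_is1Pair cardList → Spec_is1Pair cardList (is1Pair cardList)

-- ===== LEMMAS AND PROOFS =====

-- B's dict build is A's value extraction followed by the counter fold
lemma pvBuildCounts_eq (cl : List (List (String × Int))) :
    ∀ d, pvBuildCounts cl d =
      (pvNumList cl).map (fun L => L.foldl (fun d x => d.insert x (d.getD x 0 + 1)) d) := by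
  induction cl with
  | nil => intro d; rfl
  | cons card rest ih =>
    intro d
    simp only [pvBuildCounts, pvNumList]
    cases h : (PySem.Dict.mk card).get? "value" with
    | none => rfl
    | some v =>
      dsimp only
      rw [ih]
      cases pvNumList rest <;> simp

lemma pvNumList_isSome {cl : List (List (String × Int))} (h : Pre_is1Pair cl) :
    ∃ L, pvNumList cl = some L := by
  induction cl with
  | nil => exact ⟨[], rfl⟩
  | cons card rest ih =>
    have h1 := h card (List.mem_cons_self ..)
    obtain ⟨v, hv⟩ := Option.isSome_iff_exists.mp h1
    obtain ⟨L, hL⟩ := ih (fun c hc => h c (List.mem_cons_of_mem _ hc))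
    exact ⟨v :: L, by simp [pvNumList, hv, hL]⟩

-- core counting fact: positions whose value occurs exactly twice come in pairs,
-- one pair per distinct value of frequency 2
lemma countP_count_two (L : List Int) :
    L.countP (fun i => decide (L.count i = 2)) =
      2 * (PySem.List.dedup L).countP (fun v => decide (L.count v = 2)) := by
  set p : Int → Bool := fun i => decide (L.count i = 2) with hp
  have hmemp : ∀ a, p a = true ↔ L.count a = 2 := by intro a; simp [hp]
  rw [List.countP_eq_length_filter, List.countP_eq_length_filter]
  set F := L.filter p with hF
  set D := (PySem.List.dedup L).filter p with hD
  have hDnodup : D.Nodup := (PySem.List.nodup_dedup L).filter p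
  have hsets : F.toFinset = D.toFinset := by
    ext a
    simp [hF, hD]
  have hFlen : F.length = 2 * F.toFinset.card := by
    have hsum : ∑ a ∈ F.toFinset, F.count a = F.length := by
      simpa using Multiset.toFinset_sum_count_eq (↑F : Multiset Int)
    calc F.length = ∑ a ∈ F.toFinset, F.count a := hsum.symm
      _ = ∑ a ∈ F.toFinset, L.count a := by
          refine Finset.sum_congr rfl (fun a ha => ?_)
          exact List.count_filter (List.of_mem_filter (List.mem_toFinset.mp ha))
      _ = ∑ _a ∈ F.toFinset, 2 := by
          refine Finset.sum_congr rfl (fun a ha => ?_)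
          exact (hmemp a).mp (List.of_mem_filter (List.mem_toFinset.mp ha))
      _ = 2 * F.toFinset.card := by rw [Finset.sum_const]; ring
  rw [hFlen, hsets, List.toFinset_card_of_nodup hDnodup]

lemma int_count_eq (L : List Int) (i : Int) :
    (((PySem.List.count L i : Nat) : Int) == 2) = decide (L.count i = 2) := by
  rw [PySem.List.count_eq, Bool.eq_iff_iff]
  simp only [beq_iff_eq, decide_eq_true_eq]
  omega

-- ===== VERDICT (by name: the statement is the Claim_ definition above) =====
theorem is1Pair_spec : Claim_equal_is1Pair := by
  intro cardList _hdom hpre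
  unfold Spec_is1Pair
  obtain ⟨L, hL⟩ := pvNumList_isSome hpre
  unfold is1Pair is1Pair_alt
  rw [hL, pvBuildCounts_eq, hL]
  simp only [Option.map_some]
  rw [PySem.Dict.foldl_insert_getD_add_one_eq_counter]
  -- A's condition
  have hA : PySem.List.count
      (L.foldl (fun acc i => acc ++ [((PySem.List.count L i : Nat) : Int)]) []) 2
      = L.countP (fun i => decide (L.count i = 2)) := by
    rw [PySem.List.foldl_append_singleton_eq_map, List.nil_append, PySem.List.count_eq,
      List.count_eq_countP, List.countP_map]
    exact List.countP_congr (fun a _ => by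
      simp only [Function.comp_apply, int_count_eq])
  -- B's condition
  have hvals : (PySem.Dict.counter L).values =
      (PySem.Set.ofList L).map (fun k => ((L.count k : Nat) : Int)) := by
    show ((PySem.Dict.counter L).items.map Prod.snd) = _
    rw [PySem.Dict.items_counter]
    simp [List.map_map, Function.comp]
  have hB : (PySem.Dict.counter L).values.foldl (fun p c => if c = 2 then p + 1 else p) 0
      = ((PySem.List.dedup L).countP (fun v => decide (L.count v = 2)) : Int) := by
    rw [hvals, PySem.List.foldl_ite_add_one (fun c => c = (2 : Int)), List.countP_map,
      PySem.List.dedup_eq_ofList]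
    simp only [zero_add, Nat.cast_inj]
    refine List.countP_congr (fun a _ => ?_)
    simp only [Function.comp_apply, decide_eq_true_eq]
    omega
  rw [hA, hB]
  have hkey := countP_count_two L
  by_cases h2 : L.countP (fun i => decide (L.count i = 2)) = 2
  · have h1 : ((PySem.List.dedup L).countP (fun v => decide (L.count v = 2)) : Int) = 1 := by
      omega
    rw [if_pos h2, if_pos h1]
  · have h1 : ((PySem.List.dedup L).countP (fun v => decide (L.count v = 2)) : Int) ≠ 1 := by
      omega
    rw [if_neg h2, if_neg h1]
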